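-- pv_equiv track=rewrite | github.com/343549/Algosi | 2-sem/lab1/task13/solution.py | solve
-- ===== SOURCE A (Python) =====
-- def solve(n, values):
--     """
--     Проверяет, можно ли разбить сувениры на три подмножества с одинаковыми суммами.
--     """
--     total = sum(values)
--
--     # Если сумма не делится на 3, невозможно
--     if total % 3 != 0:
--         return 0
--
--     target = total // 3
--
--     # Если есть элемент больше target, невозможно
--     if any(v > target for v in values):
--         return 0
--
--     # dp[mask] = можно ли разбить элементы с маской mask на подмножества
--     # Используем битовую маску для представления подмножеств
--     # dp[mask][sum1][sum2] - можно ли разбить элементы mask так,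
--     # чтобы первое подмножество имело сумму sum1, второе - sum2
--
--     # Упрощенный подход: проверяем все возможные разбиения
--     from itertools import combinations
--
--     # Перебираем все возможные подмножества для первого и второго набора
--     all_subsets = []
--     for r in range(1, n):
--         for combo in combinations(range(n), r):
--             subset_sum = sum(values[i] for i in combo)
--             if subset_sum == target:
--                 all_subsets.append(set(combo))
--
--     # Проверяем, есть ли два непересекающихся подмножества с суммой target
--     for i, subset1 in enumerate(all_subsets):
--         for subset2 in all_subsets[i+1:]:
--             if subset1.isdisjoint(subset2):
--                 # Нашли два непересекающихся подмножества
--                 # Третье автоматически будет иметь нужную сумму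
--                 return 1
--
--     return 0
-- ===== SOURCE B (Python) =====
-- def solve(n, values):
--     """
--     Проверяет, можно ли разбить сувениры на три подмножества с одинаковыми суммами.
--     (Re-implementation: one left-to-right DP over the first n items instead of
--     enumerating all target-sum subsets and scanning all pairs.)
--     """
--     total = sum(values)
--     if total % 3 != 0:
--         return 0
--     target = total // 3
--
--     if any(v > target for v in values):
--         return 0
--
--     # states: set of (sum1, sum2, group1_nonempty, group2_nonempty) reachable by
--     # assigning each of the first n items to group 1, group 2 or the remainder.
--     states = {(0, 0, False, False)}
--     for i in range(n):
--         v = values[i]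
--         nxt = set()
--         for (s1, s2, b1, b2) in states:
--             nxt.add((s1, s2, b1, b2))
--             nxt.add((s1 + v, s2, True, b2))
--             nxt.add((s1, s2 + v, b1, True))
--         states = nxt
--     return 1 if (target, target, True, True) in states else 0
-- ===== Notes on version B (the rewrite author's own statement) =====
-- stated objective: alternative
-- what changed: Replaces A's enumeration of every target-sum index subset (all combinations for every size) followed by a quadratic scan over all pairs of subsets with a single left-to-right DP whose state is the set of reachable (sum1, sum2, nonempty1, nonempty2) tuples.
-- outside the precondition, e.g. on solve(1, []): A returns 0, B raises IndexError
import Mathlib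
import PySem

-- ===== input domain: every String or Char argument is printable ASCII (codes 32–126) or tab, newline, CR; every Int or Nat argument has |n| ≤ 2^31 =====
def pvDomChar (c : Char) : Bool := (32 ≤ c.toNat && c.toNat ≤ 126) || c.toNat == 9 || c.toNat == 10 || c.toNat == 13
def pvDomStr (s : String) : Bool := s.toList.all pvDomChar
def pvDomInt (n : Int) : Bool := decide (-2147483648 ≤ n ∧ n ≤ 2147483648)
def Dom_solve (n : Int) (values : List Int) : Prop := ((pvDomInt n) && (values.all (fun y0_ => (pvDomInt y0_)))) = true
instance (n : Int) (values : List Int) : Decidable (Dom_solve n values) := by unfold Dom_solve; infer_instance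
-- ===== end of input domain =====

-- B replaces A's full enumeration of target-sum index subsets plus a pairwise disjointness scan
-- by one left-to-right DP over the reachable (sum1, sum2, nonempty1, nonempty2) states.

-- ===== PORT A =====
-- the nested 'for i, subset1 in enumerate(all_subsets): for subset2 in all_subsets[i+1:]' pair scan
def pairSearch : List (PySem.Set Int) → Bool
  | [] => false
  | s :: rest => rest.any (fun t => PySem.Set.isdisjoint s t) || pairSearch rest

-- 'values[i]' is ported as pyGetD values i 0: exact whenever the index is in range, which
-- Pre_solve guarantees on every input that reaches the subset enumeration.
def solve (n : Int) (values : List Int) : Int :=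
  let total := values.sum
  if PySem.Int.mod total 3 ≠ 0 then 0
  else
    let target := PySem.Int.floordiv total 3
    if values.any (fun v => v > target) then 0
    else
      let allSubsets := (PySem.List.pyRange 1 n 1).foldl
        (fun acc r => acc ++
          ((PySem.List.combinations (PySem.List.pyRange 0 n 1) r.toNat).filter
            (fun c => (c.map (fun i => PySem.List.pyGetD values i 0)).sum == target)).map
            (fun c => PySem.Set.ofList c)) []
      if pairSearch allSubsets then 1 else 0

-- ===== PORT B =====
def solve_alt (n : Int) (values : List Int) : Int :=
  let total := values.sum
  if PySem.Int.mod total 3 ≠ 0 then 0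
  else
    let target := PySem.Int.floordiv total 3
    if values.any (fun v => v > target) then 0
    else
      let states := (PySem.List.pyRange 0 n 1).foldl
        (fun states i =>
          let v := PySem.List.pyGetD values i 0
          states.foldl (fun nxt st =>
            PySem.Set.add (PySem.Set.add (PySem.Set.add nxt st)
              (st.1 + v, st.2.1, true, st.2.2.2)) (st.1, st.2.1 + v, st.2.2.1, true))
            PySem.Set.empty)
        (PySem.Set.ofList [((0 : Int), (0 : Int), false, false)])
      if PySem.Set.contains states ((target, target, true, true) : Int × Int × Bool × Bool) then 1
      else 0

-- ===== PRECONDITION & SPEC =====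
-- Pre_solve excludes exactly the inputs on which the Python A does not return normally, plus the
-- single corner n = 1 with values = [] (A returns 0 there only because its combination loop is
-- empty, while B's index loop touches values[0] and raises): everywhere else with n greater than
-- len(values) and both early checks passing, A itself raises IndexError inside the subset sum.
def Pre_solve (n : Int) (values : List Int) : Prop :=
  n ≤ (values.length : Int) ∨ PySem.Int.mod values.sum 3 ≠ 0 ∨
    ∃ v ∈ values, v > PySem.Int.floordiv values.sum 3
instance (n : Int) (values : List Int) : Decidable (Pre_solve n values) := by
  unfold Pre_solve; infer_instance
def pvWitness_solve : Int × List Int := (3, [1, 1, 1])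
def Spec_solve (n : Int) (values : List Int) (out : Int) : Prop := out = solve_alt n values
instance (n : Int) (values : List Int) (out : Int) : Decidable (Spec_solve n values out) := by
  unfold Spec_solve; infer_instance

-- ===== CLAIM (what is proved, stated in full; the proofs are below) =====
def Claim_equal_solve : Prop := ∀ (n : Int) (values : List Int),
  Dom_solve n values → Pre_solve n values → Spec_solve n values (solve n values)

-- ===== LEMMAS AND PROOFS =====

-- the common ground both ports are reduced to: two disjoint nonempty index subsets of idxs whose
-- values sum to target each
def GoodPair (idxs : List Int) (f : Int → Int) (target : Int) : Prop :=
  ∃ c1 c2 : List Int, c1.Sublist idxs ∧ c2.Sublist idxs ∧ c1.Disjoint c2 ∧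
    c1 ≠ [] ∧ c2 ≠ [] ∧ (c1.map f).sum = target ∧ (c2.map f).sum = target

lemma mem_dpStep (v : Int) (S init : List (Int × Int × Bool × Bool)) (x : Int × Int × Bool × Bool) :
    x ∈ List.foldl (fun nxt st =>
        PySem.Set.add (PySem.Set.add (PySem.Set.add nxt st)
          (st.1 + v, st.2.1, true, st.2.2.2)) (st.1, st.2.1 + v, st.2.2.1, true)) init S
    ↔ x ∈ init ∨ ∃ st ∈ S, x = st ∨ x = (st.1 + v, st.2.1, true, st.2.2.2) ∨
        x = (st.1, st.2.1 + v, st.2.2.1, true) := by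
  induction S generalizing init with
  | nil => simp
  | cons a S ih =>
    rw [List.foldl_cons, ih]
    simp only [PySem.Set.mem_add, List.mem_cons]
    constructor
    · rintro ((((h | h) | h) | h) | ⟨st, hst, h⟩)
      · exact Or.inl h
      · exact Or.inr ⟨a, Or.inl rfl, Or.inl h⟩
      · exact Or.inr ⟨a, Or.inl rfl, Or.inr (Or.inl h)⟩
      · exact Or.inr ⟨a, Or.inl rfl, Or.inr (Or.inr h)⟩
      · exact Or.inr ⟨st, Or.inr hst, h⟩
    · rintro (h | ⟨st, (rfl | hst), h⟩)
      · exact Or.inl (Or.inl (Or.inl (Or.inl h)))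
      · rcases h with h | h | h
        · exact Or.inl (Or.inl (Or.inl (Or.inr h)))
        · exact Or.inl (Or.inl (Or.inr h))
        · exact Or.inl (Or.inr h)
      · exact Or.inr ⟨st, hst, h⟩

lemma mem_dpFold (f : Int → Int) (idxs : List Int) : ∀ (x : Int × Int × Bool × Bool),
    idxs.Nodup →
    (x ∈ idxs.foldl (fun states i =>
        List.foldl (fun nxt st =>
          PySem.Set.add (PySem.Set.add (PySem.Set.add nxt st)
            (st.1 + f i, st.2.1, true, st.2.2.2)) (st.1, st.2.1 + f i, st.2.2.1, true))
          PySem.Set.empty states)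
        (PySem.Set.ofList [((0 : Int), (0 : Int), false, false)])
    ↔ ∃ c1 c2 : List Int, c1.Sublist idxs ∧ c2.Sublist idxs ∧ c1.Disjoint c2 ∧
        x = ((c1.map f).sum, (c2.map f).sum, !c1.isEmpty, !c2.isEmpty)) := by
  induction idxs using List.reverseRecOn with
  | nil =>
    intro x _
    simp only [List.foldl_nil]
    constructor
    · intro hx
      have : x = ((0 : Int), (0 : Int), false, false) := by
        simpa [PySem.Set.mem_ofList] using hx
      exact ⟨[], [], List.nil_sublist _, List.nil_sublist _, by simp [List.Disjoint], by simp [this]⟩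
    · rintro ⟨c1, c2, hc1, hc2, -, rfl⟩
      rw [List.sublist_nil] at hc1 hc2
      subst hc1; subst hc2
      simp [PySem.Set.mem_ofList]
  | append_singleton ys y ih =>
    intro x hnd
    rw [List.nodup_append] at hnd
    have hyys : y ∉ ys := fun hm => hnd.2.2 y hm y (by simp) rfl
    rw [List.foldl_append, List.foldl_cons, List.foldl_nil, mem_dpStep]
    have hemp : ¬ x ∈ (PySem.Set.empty : PySem.Set (Int × Int × Bool × Bool)) := by
      simp [PySem.Set.empty]
    constructor
    · rintro (h | ⟨st, hst, hx⟩)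
      · exact absurd h hemp
      obtain ⟨c1, c2, hc1, hc2, hdisj, rfl⟩ := (ih st hnd.1).mp hst
      have hc1' : c1.Sublist (ys ++ [y]) := hc1.trans (List.sublist_append_left ys [y])
      have hc2' : c2.Sublist (ys ++ [y]) := hc2.trans (List.sublist_append_left ys [y])
      rcases hx with rfl | rfl | rfl
      · exact ⟨c1, c2, hc1', hc2', hdisj, rfl⟩
      · refine ⟨c1 ++ [y], c2, hc1.append (List.Sublist.refl [y]), hc2', ?_, ?_⟩
        · intro a ha hac2
          rcases List.mem_append.mp ha with h | h
          · exact hdisj h hac2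
          · rw [List.mem_singleton] at h; subst h
            exact hyys (hc2.subset hac2)
        · simp
      · refine ⟨c1, c2 ++ [y], hc1', hc2.append (List.Sublist.refl [y]), ?_, ?_⟩
        · intro a ha hac2
          rcases List.mem_append.mp hac2 with h | h
          · exact hdisj ha h
          · rw [List.mem_singleton] at h; subst h
            exact hyys (hc1.subset ha)
        · simp
    · rintro ⟨c1, c2, hc1, hc2, hdisj, rfl⟩
      right
      obtain ⟨a1, b1, rfl, ha1, hb1⟩ := List.sublist_append_iff.mp hc1
      obtain ⟨a2, b2, rfl, ha2, hb2⟩ := List.sublist_append_iff.mp hc2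
      rcases List.sublist_singleton.mp hb1 with rfl | rfl <;>
        rcases List.sublist_singleton.mp hb2 with rfl | rfl
      · -- neither contains y
        refine ⟨_, (ih _ hnd.1).mpr ⟨a1, a2, ha1, ha2, ?_, rfl⟩, Or.inl ?_⟩
        · intro a ha hb; exact hdisj (by simpa using ha) (by simpa using hb)
        · simp
      · -- y in c2 only
        refine ⟨_, (ih _ hnd.1).mpr ⟨a1, a2, ha1, ha2, ?_, rfl⟩, Or.inr (Or.inr ?_)⟩
        · intro a ha hb
          exact hdisj (by simpa using ha) (List.mem_append_left _ hb)
        · simp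
      · -- y in c1 only
        refine ⟨_, (ih _ hnd.1).mpr ⟨a1, a2, ha1, ha2, ?_, rfl⟩, Or.inr (Or.inl ?_)⟩
        · intro a ha hb
          exact hdisj (List.mem_append_left _ ha) (by simpa using hb)
        · simp
      · -- y in both: contradicts disjointness
        exact (hdisj (List.mem_append_right a1 (List.mem_singleton_self y))
          (List.mem_append_right a2 (List.mem_singleton_self y))).elim

lemma isdisjoint_comm_true {s t : PySem.Set Int} (h : PySem.Set.isdisjoint s t = true) :
    PySem.Set.isdisjoint t s = true :=
  (PySem.Set.isdisjoint_iff _ _).mpr (fun x hxt hxs => (PySem.Set.isdisjoint_iff _ _).mp h x hxs hxt)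

lemma pairSearch_iff (l : List (PySem.Set Int))
    (h : ∀ s ∈ l, PySem.Set.isdisjoint s s = false) :
    pairSearch l = true ↔ ∃ s ∈ l, ∃ t ∈ l, PySem.Set.isdisjoint s t = true := by
  induction l with
  | nil => simp [pairSearch]
  | cons a l ih =>
    have ha := h a (List.mem_cons_self)
    have hl := fun s hs => h s (List.mem_cons_of_mem a hs)
    rw [pairSearch, Bool.or_eq_true, List.any_eq_true, ih hl]
    constructor
    · rintro (⟨t, ht, hd⟩ | ⟨s, hs, t, ht, hd⟩)
      · exact ⟨a, List.mem_cons_self, t, List.mem_cons_of_mem a ht, hd⟩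
      · exact ⟨s, List.mem_cons_of_mem a hs, t, List.mem_cons_of_mem a ht, hd⟩
    · rintro ⟨s, hs, t, ht, hd⟩
      rcases List.mem_cons.mp hs with rfl | hs
      · rcases List.mem_cons.mp ht with rfl | ht
        · rw [ha] at hd; exact absurd hd (by simp)
        · exact Or.inl ⟨t, ht, hd⟩
      · rcases List.mem_cons.mp ht with h2 | ht
        · exact Or.inl ⟨s, hs, isdisjoint_comm_true (h2 ▸ hd)⟩
        · exact Or.inr ⟨s, hs, t, ht, hd⟩

lemma mem_allSubsets (n : Int) (values : List Int) (target : Int) (S : PySem.Set Int) :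
    S ∈ (PySem.List.pyRange 1 n 1).foldl
      (fun acc r => acc ++
        ((PySem.List.combinations (PySem.List.pyRange 0 n 1) r.toNat).filter
          (fun c => (c.map (fun i => PySem.List.pyGetD values i 0)).sum == target)).map
          (fun c => PySem.Set.ofList c)) []
    ↔ ∃ c : List Int, c.Sublist (PySem.List.pyRange 0 n 1) ∧ c ≠ [] ∧ (c.length : Int) < n ∧
        (c.map (fun i => PySem.List.pyGetD values i 0)).sum = target ∧ S = PySem.Set.ofList c := by
  rw [PySem.List.foldl_append_eq_flatMap]
  simp only [List.nil_append, List.mem_flatMap, List.mem_map, List.mem_filter,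
    PySem.List.mem_combinations_iff, PySem.List.mem_pyRange_one, beq_iff_eq]
  constructor
  · rintro ⟨r, ⟨hr1, hrn⟩, c, ⟨⟨hsub, hlen⟩, hsum⟩, rfl⟩
    refine ⟨c, hsub, ?_, ?_, hsum, rfl⟩
    · intro hnil; subst hnil; simp at hlen; omega
    · rw [hlen]; omega
  · rintro ⟨c, hsub, hne, hlt, hsum, rfl⟩
    have hpos : 0 < c.length := by
      cases c with
      | nil => exact absurd rfl hne
      | cons _ _ => simp
    exact ⟨(c.length : Int), ⟨by omega, hlt⟩, c, ⟨⟨hsub, by simp⟩, hsum⟩, rfl⟩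

lemma pairSearch_iff_good (n : Int) (values : List Int) (target : Int) :
    pairSearch ((PySem.List.pyRange 1 n 1).foldl
      (fun acc r => acc ++
        ((PySem.List.combinations (PySem.List.pyRange 0 n 1) r.toNat).filter
          (fun c => (c.map (fun i => PySem.List.pyGetD values i 0)).sum == target)).map
          (fun c => PySem.Set.ofList c)) []) = true
    ↔ GoodPair (PySem.List.pyRange 0 n 1) (fun i => PySem.List.pyGetD values i 0) target := by
  rw [pairSearch_iff]
  · constructor
    · rintro ⟨s, hs, t, ht, hd⟩
      obtain ⟨c1, hsub1, hne1, -, hsum1, rfl⟩ := (mem_allSubsets n values target s).mp hs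
      obtain ⟨c2, hsub2, hne2, -, hsum2, rfl⟩ := (mem_allSubsets n values target t).mp ht
      refine ⟨c1, c2, hsub1, hsub2, ?_, hne1, hne2, hsum1, hsum2⟩
      intro a ha hb
      exact (PySem.Set.isdisjoint_iff _ _).mp hd a ((PySem.Set.mem_ofList _ _).mpr ha)
        ((PySem.Set.mem_ofList _ _).mpr hb)
    · rintro ⟨c1, c2, hsub1, hsub2, hdisj, hne1, hne2, hsum1, hsum2⟩
      have hnd : (PySem.List.pyRange 0 n 1).Nodup := PySem.List.nodup_pyRange_one 0 n
      have h12 : (c1 ++ c2).Nodup := List.nodup_append.mpr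
        ⟨hsub1.nodup hnd, hsub2.nodup hnd, fun a ha b hb heq => hdisj ha (heq ▸ hb)⟩
      have hsubset : (c1 ++ c2) ⊆ PySem.List.pyRange 0 n 1 := by
        intro a ha
        rcases List.mem_append.mp ha with h | h
        exacts [hsub1.subset h, hsub2.subset h]
      have hlen : c1.length + c2.length ≤ (n - 0).toNat := by
        have := (h12.subperm hsubset).length_le
        rw [PySem.List.length_pyRange_one] at this
        simpa using this
      have hp1 : 0 < c1.length := by
        cases c1 with
        | nil => exact absurd rfl hne1
        | cons _ _ => simp
      have hp2 : 0 < c2.length := by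
        cases c2 with
        | nil => exact absurd rfl hne2
        | cons _ _ => simp
      refine ⟨PySem.Set.ofList c1,
        (mem_allSubsets n values target _).mpr ⟨c1, hsub1, hne1, by omega, hsum1, rfl⟩,
        PySem.Set.ofList c2,
        (mem_allSubsets n values target _).mpr ⟨c2, hsub2, hne2, by omega, hsum2, rfl⟩, ?_⟩
      exact (PySem.Set.isdisjoint_iff _ _).mpr
        (fun x hx hxt => hdisj ((PySem.Set.mem_ofList _ _).mp hx) ((PySem.Set.mem_ofList _ _).mp hxt))
  · intro s hs
    obtain ⟨c, hsub, hne, -, -, rfl⟩ := (mem_allSubsets n values target s).mp hs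
    cases hb : PySem.Set.isdisjoint (PySem.Set.ofList c) (PySem.Set.ofList c)
    · rfl
    · exfalso
      obtain ⟨x, hx⟩ := List.exists_mem_of_ne_nil c hne
      exact (PySem.Set.isdisjoint_iff _ _).mp hb x ((PySem.Set.mem_ofList _ _).mpr hx)
        ((PySem.Set.mem_ofList _ _).mpr hx)

lemma dp_iff_good (n : Int) (values : List Int) (target : Int) :
    PySem.Set.contains ((PySem.List.pyRange 0 n 1).foldl
        (fun states i =>
          List.foldl (fun nxt st =>
            PySem.Set.add (PySem.Set.add (PySem.Set.add nxt st)
              (st.1 + PySem.List.pyGetD values i 0, st.2.1, true, st.2.2.2))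
              (st.1, st.2.1 + PySem.List.pyGetD values i 0, st.2.2.1, true))
            PySem.Set.empty states)
        (PySem.Set.ofList [((0 : Int), (0 : Int), false, false)]))
      ((target, target, true, true) : Int × Int × Bool × Bool) = true
    ↔ GoodPair (PySem.List.pyRange 0 n 1) (fun i => PySem.List.pyGetD values i 0) target := by
  rw [PySem.Set.contains_iff _ _,
    mem_dpFold (fun i => PySem.List.pyGetD values i 0) (PySem.List.pyRange 0 n 1)
      ((target, target, true, true)) (PySem.List.nodup_pyRange_one 0 n)]
  constructor
  · rintro ⟨c1, c2, hc1, hc2, hdisj, heq⟩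
    have h1 : (c1.map (fun i => PySem.List.pyGetD values i 0)).sum = target := (Prod.ext_iff.mp heq).1.symm
    have hrest := (Prod.ext_iff.mp heq).2
    have h2 : (c2.map (fun i => PySem.List.pyGetD values i 0)).sum = target := (Prod.ext_iff.mp hrest).1.symm
    have hrest2 := (Prod.ext_iff.mp hrest).2
    have hb1 : (!c1.isEmpty) = true := (Prod.ext_iff.mp hrest2).1.symm
    have hb2 : (!c2.isEmpty) = true := (Prod.ext_iff.mp hrest2).2.symm
    refine ⟨c1, c2, hc1, hc2, hdisj, ?_, ?_, h1, h2⟩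
    · simpa using hb1
    · simpa using hb2
  · rintro ⟨c1, c2, hc1, hc2, hdisj, hne1, hne2, hsum1, hsum2⟩
    refine ⟨c1, c2, hc1, hc2, hdisj, ?_⟩
    rw [hsum1, hsum2]
    have hb1 : c1.isEmpty = false := by simpa using hne1
    have hb2 : c2.isEmpty = false := by simpa using hne2
    rw [hb1, hb2]; rfl

lemma ports_eq (n : Int) (values : List Int) : solve n values = solve_alt n values := by
  simp only [solve, solve_alt]
  refine if_congr Iff.rfl rfl ?_
  refine if_congr Iff.rfl rfl ?_
  exact if_congr ((pairSearch_iff_good n values _).trans (dp_iff_good n values _).symm) rfl rfl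

-- ===== VERDICT (by name: the statement is the Claim_ definition above) =====
theorem solve_spec : Claim_equal_solve := by
  intro n values _ _
  exact ports_eq n values
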